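-- pv_equiv track=rewrite | github.com/dchunwong/ItsPersonal | test.py | shapes
-- ===== SOURCE A (Python) =====
-- def shapes(f, v):
-- 	shapes_list=[]
-- 	used_v= set([])
-- 	for z in range(0, len(f)):
-- 		faces =[]
-- 		if used_v.isdisjoint(f[z]) == False:
-- 			continue
-- 		else:
-- 			shape_set=set(f[z])
-- 		for x in range(z, len(f)):
-- 			for i in range(z, len(f)):
-- 				for a in range(z, len(f)):
-- 					if shape_set.isdisjoint(f[a]) == False:
-- 						shape_set.update(f[a])
-- 						used_v.update(shape_set)
-- 			if shape_set.isdisjoint(f[x]) == False: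
-- 				faces.append(f[x])
-- 		shapes_list.append(faces)
-- 	return shapes_list
-- ===== SOURCE B (Python) =====
-- def shapes(f, v):
--     # One pass of incremental component merging: keep one vertex set per shape,
--     # ordered by the shape's first face; then filter faces per component.
--     comps = []
--     for face in f:
--         vs = set(face)
--         keep = []
--         pos = None
--         for c in comps:
--             if c.isdisjoint(vs):
--                 keep.append(c)
--             else:
--                 vs |= c
--                 if pos is None:
--                     pos = len(keep)
--         if pos is None:
--             keep.append(vs)
--         else:
--             keep.insert(pos, vs)
--         comps = keep
--     return [[g for g in f if not c.isdisjoint(g)] for c in comps]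
-- ===== Notes on version B (the rewrite author's own statement) =====
-- stated objective: faster
-- what changed: Replaces A's quadruple nested loop (repeated full-saturation passes per start face) by a single pass over the faces that incrementally merges disjoint vertex-set components, then emits each component's faces once.
import Mathlib
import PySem

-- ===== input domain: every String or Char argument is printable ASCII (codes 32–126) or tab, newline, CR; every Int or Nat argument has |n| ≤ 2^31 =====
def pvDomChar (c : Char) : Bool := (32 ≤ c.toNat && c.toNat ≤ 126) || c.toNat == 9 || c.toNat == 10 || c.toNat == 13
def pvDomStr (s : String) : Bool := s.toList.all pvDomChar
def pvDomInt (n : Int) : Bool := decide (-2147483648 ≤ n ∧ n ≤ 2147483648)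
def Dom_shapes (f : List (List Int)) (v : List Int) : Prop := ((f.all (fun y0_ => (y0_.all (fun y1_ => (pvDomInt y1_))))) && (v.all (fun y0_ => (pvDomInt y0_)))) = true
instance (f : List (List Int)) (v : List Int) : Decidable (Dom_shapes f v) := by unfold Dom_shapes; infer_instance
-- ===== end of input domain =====

-- B replaces A's quadruple nested saturation loops by a single merge pass over the faces
-- (objective: faster). Equivalence of the RETURN values is proved for all inputs.

-- ===== PORT A =====
-- body of the innermost 'for a' loop, on the face value
def pstep (st : PySem.Set Int × PySem.Set Int) (g : List Int) :
    PySem.Set Int × PySem.Set Int :=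
  if PySem.Set.isdisjoint st.1 g = false then
    let ss := PySem.Set.update st.1 g
    (ss, PySem.Set.update st.2 ss)
  else st

-- 'if shape_set.isdisjoint(f[a]) == False: shape_set.update(f[a]); used_v.update(shape_set)'
def aAbsorb (f : List (List Int)) (st : PySem.Set Int × PySem.Set Int) (a : Int) :
    PySem.Set Int × PySem.Set Int :=
  pstep st (PySem.List.pyGetD f a [])

-- 'for i in range(z, len(f)): for a in range(z, len(f)): ...'
def aILoop (f : List (List Int)) (z : Int) (st : PySem.Set Int × PySem.Set Int) :
    PySem.Set Int × PySem.Set Int :=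
  (PySem.List.pyRange z (PySem.List.len f) 1).foldl
    (fun st2 _i => (PySem.List.pyRange z (PySem.List.len f) 1).foldl (aAbsorb f) st2) st

-- body of the 'for x' loop: run the saturation loops, then append f[x] if it meets shape_set
def aXBody (f : List (List Int)) (z : Int)
    (st : PySem.Set Int × PySem.Set Int × List (List Int)) (x : Int) :
    PySem.Set Int × PySem.Set Int × List (List Int) :=
  let st3 := aILoop f z (st.1, st.2.1)
  let fx := PySem.List.pyGetD f x []
  if PySem.Set.isdisjoint st3.1 fx = false then (st3.1, st3.2, st.2.2 ++ [fx])
  else (st3.1, st3.2, st.2.2)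

-- body of the outer 'for z' loop
def aZBody (f : List (List Int)) (st : List (List (List Int)) × PySem.Set Int) (z : Int) :
    List (List (List Int)) × PySem.Set Int :=
  let fz := PySem.List.pyGetD f z []
  if PySem.Set.isdisjoint st.2 fz = false then st
  else
    let r := (PySem.List.pyRange z (PySem.List.len f) 1).foldl (aXBody f z)
      (PySem.Set.ofList fz, st.2, ([] : List (List Int)))
    (st.1 ++ [r.2.2], r.2.1)

def shapes (f : List (List Int)) (v : List Int) : List (List (List Int)) :=
  ((PySem.List.pyRange 0 (PySem.List.len f) 1).foldl (aZBody f)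
    (([] : List (List (List Int))), PySem.Set.empty)).1

-- ===== PORT B =====
-- body of the 'for c in comps' scan: state (keep, pos, vs)
def bScanBody (st : List (PySem.Set Int) × Option Int × PySem.Set Int) (c : PySem.Set Int) :
    List (PySem.Set Int) × Option Int × PySem.Set Int :=
  if PySem.Set.isdisjoint c st.2.2 then (st.1 ++ [c], st.2.1, st.2.2)
  else (st.1, some (st.2.1.getD (PySem.List.len st.1)), PySem.Set.union st.2.2 c)

-- one face step: merge every component meeting the face into one, kept at the first one's slot
def bStep (comps : List (PySem.Set Int)) (face : List Int) : List (PySem.Set Int) :=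
  let st := comps.foldl bScanBody ([], none, PySem.Set.ofList face)
  match st.2.1 with
  | none => st.1 ++ [st.2.2]
  | some p => PySem.List.insert st.1 p st.2.2

def shapes_alt (f : List (List Int)) (v : List Int) : List (List (List Int)) :=
  let comps := f.foldl bStep []
  comps.map (fun c => f.filter (fun g => !(PySem.Set.isdisjoint c g)))

-- ===== PRECONDITION & SPEC =====
def Spec_shapes (f : List (List Int)) (v : List Int) (out : List (List (List Int))) : Prop := out = shapes_alt f v
instance (f : List (List Int)) (v : List Int) (out : List (List (List Int))) : Decidable (Spec_shapes f v out) := by unfold Spec_shapes; infer_instance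

-- ===== CLAIM (what is proved, stated in full; the proofs are below) =====
def Claim_equal_shapes : Prop := ∀ (f : List (List Int)) (v : List Int), Dom_shapes f v → Spec_shapes f v (shapes f v)

-- ===== LEMMAS AND PROOFS =====

-- x is a vertex of face g lying in the vertex collection s
def VTouch (g : List Int) (s : List Int) : Prop := ∃ x, x ∈ g ∧ x ∈ s

-- vertices reachable from the vertex collection V0 through shared-vertex faces of F
inductive Reach (F : List (List Int)) (V0 : List Int) : Int → Prop
  | base {x : Int} : x ∈ V0 → Reach F V0 x
  | step {g : List Int} {x y : Int} : g ∈ F → y ∈ g → Reach F V0 y → x ∈ g → Reach F V0 x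

-- the scan both programs perform: walk the faces; a face meeting `used` is skipped,
-- otherwise its whole connected component (as a vertex collection c) is emitted
inductive Scan (F : List (List Int)) : List (List Int) → (Int → Prop) → List (List Int) → Prop
  | nil {used : Int → Prop} : Scan F [] used []
  | skip {h : List Int} {rest : List (List Int)} {used : Int → Prop} {cs : List (List Int)} :
      (∃ x ∈ h, used x) → Scan F rest used cs → Scan F (h :: rest) used cs
  | lead {h : List Int} {rest : List (List Int)} {used : Int → Prop} {c : List Int} {cs : List (List Int)} :
      h ∈ F → (∀ x ∈ h, ¬ used x) → (∀ x, x ∈ c ↔ Reach F h x) →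
      Scan F rest (fun x => used x ∨ x ∈ c) cs → Scan F (h :: rest) used (c :: cs)

-- one sequential saturation pass of A over the faces F
def pass1 (F : List (List Int)) (s : PySem.Set Int) : PySem.Set Int :=
  F.foldl (fun s g => if PySem.Set.isdisjoint s g = false then PySem.Set.update s g else s) s

def iterPass (F : List (List Int)) : Nat → PySem.Set Int → PySem.Set Int
  | 0, s => s
  | (k+1), s => iterPass F k (pass1 F s)

def ClosedF (F : List (List Int)) (s : List Int) : Prop :=
  ∀ g ∈ F, VTouch g s → ∀ x ∈ g, x ∈ s

def TouchAny (F : List (List Int)) (s : List Int) : Prop := ∃ g ∈ F, VTouch g s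

def touched (F : List (List Int)) (s : PySem.Set Int) : Nat :=
  F.countP (fun g => !(PySem.Set.isdisjoint s g))

-- recursive characterization of B's merge step
def absorbR : List (PySem.Set Int) → PySem.Set Int → PySem.Set Int × List (PySem.Set Int)
  | [], vs => (vs, [])
  | c :: cs, vs =>
    if PySem.Set.isdisjoint c vs then
      let r := absorbR cs vs; (r.1, c :: r.2)
    else absorbR cs (PySem.Set.union vs c)

def mergeR : List (PySem.Set Int) → PySem.Set Int → List (PySem.Set Int)
  | [], vs => [vs]
  | c :: cs, vs =>
    if PySem.Set.isdisjoint c vs then c :: mergeR cs vs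
    else
      let r := absorbR cs (PySem.Set.union vs c)
      r.1 :: r.2

-- ---- basic bridges ----
theorem isdisjoint_false_iff (s g : List Int) :
    (PySem.Set.isdisjoint s g = false) ↔ VTouch g s := by
  rw [Bool.eq_false_iff, Ne, PySem.Set.isdisjoint_iff]
  unfold VTouch
  push_neg
  constructor
  · rintro ⟨x, h1, h2⟩; exact ⟨x, h2, h1⟩
  · rintro ⟨x, h1, h2⟩; exact ⟨x, h2, h1⟩

theorem isdisjoint_congr {s s' : List Int} (g : List Int)
    (h : ∀ x, x ∈ s ↔ x ∈ s') : PySem.Set.isdisjoint s g = PySem.Set.isdisjoint s' g := by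
  by_cases hd : PySem.Set.isdisjoint s g = true
  · have h2 : PySem.Set.isdisjoint s' g = true :=
      (PySem.Set.isdisjoint_iff _ _).2 (fun x hx => (PySem.Set.isdisjoint_iff _ _).1 hd x ((h x).2 hx))
    rw [hd, h2]
  · have h1 := Bool.eq_false_iff.2 hd
    have h2 : PySem.Set.isdisjoint s' g = false := by
      rcases (isdisjoint_false_iff s g).1 h1 with ⟨x, hxg, hxs⟩
      exact (isdisjoint_false_iff s' g).2 ⟨x, hxg, (h x).1 hxs⟩
    rw [h1, h2]

theorem update_eq_self_of_subset {s : PySem.Set Int} {xs : List Int}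
    (h : ∀ x ∈ xs, x ∈ s) : PySem.Set.update s xs = s := by
  rw [PySem.Set.update_eq_append_filter]
  have hf : (PySem.Set.ofList xs).filter (fun y => !(PySem.Set.contains s y)) = [] := by
    apply List.filter_eq_nil_iff.2
    intro a ha
    have hmem : a ∈ s := h a ((PySem.Set.mem_ofList _ _).1 ha)
    simp [PySem.Set.contains_iff]
    exact hmem
  rw [hf, List.append_nil]

-- ---- Reach theory ----
theorem reach_nil {F : List (List Int)} {x : Int} : ¬ Reach F [] x := by
  intro h
  induction h with
  | base hx => simp at hx
  | step hg hy hr hx ih => exact ih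

theorem reach_mono {F F' : List (List Int)} {V0 : List Int} {x : Int}
    (hF : ∀ g ∈ F, g ∈ F') (h : Reach F V0 x) : Reach F' V0 x := by
  induction h with
  | base hx => exact .base hx
  | step hg hy hr hx ih => exact .step (hF _ hg) hy ih hx

theorem reach_trans {F : List (List Int)} {V0 V1 : List Int} {x : Int}
    (h1 : ∀ y ∈ V1, Reach F V0 y) (h : Reach F V1 x) : Reach F V0 x := by
  induction h with
  | base hx => exact h1 _ hx
  | step hg hy hr hx ih => exact .step hg hy ih hx

theorem reach_elim {F : List (List Int)} {V0 : List Int} {x : Int}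
    (P : Int → Prop) (hbase : ∀ y ∈ V0, P y)
    (hstep : ∀ g ∈ F, (∃ y ∈ g, P y) → ∀ z ∈ g, P z)
    (h : Reach F V0 x) : P x := by
  induction h with
  | base hx => exact hbase _ hx
  | step hg hy hr hx ih => exact hstep _ hg ⟨_, hy, ih⟩ _ hx

theorem reach_single_of_mem_face {F : List (List Int)} {g : List Int} {u x : Int}
    (hg : g ∈ F) (hu : u ∈ g) (h : Reach F g x) : Reach F [u] x :=
  reach_trans (fun y hy => .step hg hu (.base (by simp)) hy) h

theorem reach_symm_single {F : List (List Int)} {u v : Int}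
    (h : Reach F [u] v) : Reach F [v] u := by
  induction h with
  | base hx =>
    have : _ = u := List.mem_singleton.1 hx
    subst this
    exact .base (by simp)
  | @step g x y hg hy hr hx ih =>
    have hyx : Reach F [x] y := .step hg hx (.base (by simp)) hy
    exact reach_trans (fun z hz => by rw [List.mem_singleton.1 hz]; exact hyx) ih

theorem comp_glue {F : List (List Int)} {c0 g : List Int} {v : Int}
    (hc0 : c0 ∈ F) (hg : g ∈ F) (hv : Reach F c0 v) (hv' : Reach F g v) :
    ∀ x, Reach F c0 x → Reach F g x := by
  intro x hx
  obtain ⟨u, hu⟩ : ∃ u, u ∈ c0 := by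
    cases hc : c0 with
    | nil => rw [hc] at hv; exact absurd hv reach_nil
    | cons a t => exact ⟨a, by simp [hc]⟩
  have hxu : Reach F [u] x := reach_single_of_mem_face hc0 hu hx
  have hvu : Reach F [u] v := reach_single_of_mem_face hc0 hu hv
  have huv : Reach F [v] u := reach_symm_single hvu
  have hxv : Reach F [v] x :=
    reach_trans (fun z hz => by rw [List.mem_singleton.1 hz]; exact huv) hxu
  exact reach_trans (fun z hz => by rw [List.mem_singleton.1 hz]; exact hv') hxv

theorem reach_not_used {F : List (List Int)} {V0 : List Int} (used : Int → Prop)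
    (hclosed : ∀ g ∈ F, (∃ x ∈ g, used x) → ∀ x ∈ g, used x)
    (hV0 : ∀ x ∈ V0, ¬ used x) :
    ∀ x, Reach F V0 x → ¬ used x := by
  intro x hr
  have h := reach_elim (fun z => Reach F V0 z ∧ ¬ used z)
    (fun y hy => ⟨.base hy, hV0 y hy⟩)
    (fun g hgF hex z hz => by
      rcases hex with ⟨y, hy, hry, hny⟩
      refine ⟨.step hgF hy hry hz, ?_⟩
      intro hz'
      exact hny (hclosed g hgF ⟨z, hz, hz'⟩ y hy)) hr
  exact h.2

-- ---- Scan facts ----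
theorem scan_closed_extend {F : List (List Int)} {used : Int → Prop} {c h0 : List Int}
    (hclosed : ∀ h ∈ F, (∃ x ∈ h, used x) → ∀ x ∈ h, used x)
    (hc : ∀ x, x ∈ c ↔ Reach F h0 x) :
    ∀ h ∈ F, (∃ x ∈ h, used x ∨ x ∈ c) → ∀ x ∈ h, used x ∨ x ∈ c := by
  intro h hF hex x hx
  rcases hex with ⟨y, hy, hy2⟩
  rcases hy2 with hyu | hyc
  · exact Or.inl (hclosed h hF ⟨y, hy, hyu⟩ x hx)
  · exact Or.inr ((hc x).2 (.step hF hy ((hc y).1 hyc) hx))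

theorem scan_cover {F : List (List Int)} {rest : List (List Int)} {used : Int → Prop}
    {cs : List (List Int)} (hs : Scan F rest used cs)
    (hsuf : ∀ h ∈ rest, h ∈ F)
    (hclosed : ∀ h ∈ F, (∃ x ∈ h, used x) → ∀ x ∈ h, used x) :
    ∀ h ∈ rest, (∀ x ∈ h, used x) ∨ ∃ c ∈ cs, ∀ x ∈ h, x ∈ c := by
  induction hs with
  | nil => intro h hh; cases hh
  | @skip h1 rest1 used1 cs1 htouch hrest ih =>
    intro h hh
    rcases List.mem_cons.1 hh with rfl | hh'
    · rcases htouch with ⟨x, hx, hxu⟩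
      exact Or.inl (hclosed h (hsuf h (by simp)) ⟨x, hx, hxu⟩)
    · exact ih (fun g hg => hsuf g (List.mem_cons_of_mem _ hg)) hclosed h hh'
  | @lead h1 rest1 used1 c1 cs1 hF1 hnu hc1 hrest ih =>
    intro h hh
    rcases List.mem_cons.1 hh with rfl | hh'
    · exact Or.inr ⟨c1, by simp, fun x hx => (hc1 x).2 (.base hx)⟩
    · have hclosed' := scan_closed_extend hclosed hc1
      rcases ih (fun g hg => hsuf g (List.mem_cons_of_mem _ hg)) hclosed' h hh' with hl | ⟨c, hcin, hsub⟩
      · by_cases htc : ∃ x ∈ h, x ∈ c1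
        · refine Or.inr ⟨c1, by simp, ?_⟩
          rcases htc with ⟨y, hy, hyc⟩
          intro x hx
          exact (hc1 x).2 (.step (hsuf h hh) hy ((hc1 y).1 hyc) hx)
        · refine Or.inl ?_
          intro x hx
          rcases hl x hx with hxu | hxc
          · exact hxu
          · exact absurd ⟨x, hx, hxc⟩ htc
      · exact Or.inr ⟨c, List.mem_cons_of_mem _ hcin, hsub⟩

theorem scan_comps {F : List (List Int)} {rest : List (List Int)} {used : Int → Prop}
    {cs : List (List Int)} (hs : Scan F rest used cs)
    (hclosed : ∀ h ∈ F, (∃ x ∈ h, used x) → ∀ x ∈ h, used x) :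
    ∀ c ∈ cs, (∀ x ∈ c, ¬ used x) ∧ (∃ h ∈ F, ∀ x, x ∈ c ↔ Reach F h x) := by
  induction hs with
  | nil => intro c hc; cases hc
  | skip htouch hrest ih => exact ih hclosed
  | @lead h1 rest1 used1 c1 cs1 hF1 hnu hc1 hrest ih =>
    intro c hc
    rcases List.mem_cons.1 hc with rfl | hc'
    · refine ⟨?_, ⟨h1, hF1, hc1⟩⟩
      intro x hx
      exact reach_not_used used1 hclosed hnu x ((hc1 x).1 hx)
    · have hclosed' := scan_closed_extend hclosed hc1
      have := ih hclosed' c hc'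
      exact ⟨fun x hx hxu => this.1 x hx (Or.inl hxu), this.2⟩

theorem scan_pairwise {F : List (List Int)} {rest : List (List Int)} {used : Int → Prop}
    {cs : List (List Int)} (hs : Scan F rest used cs)
    (hclosed : ∀ h ∈ F, (∃ x ∈ h, used x) → ∀ x ∈ h, used x) :
    cs.Pairwise (fun c c' => ∀ x, x ∈ c → x ∉ c') := by
  induction hs with
  | nil => exact List.Pairwise.nil
  | skip htouch hrest ih => exact ih hclosed
  | @lead h1 rest1 used1 c1 cs1 hF1 hnu hc1 hrest ih =>
    have hclosed' := scan_closed_extend hclosed hc1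
    refine List.Pairwise.cons ?_ (ih hclosed')
    intro c' hc' x hxc1 hxc'
    exact (scan_comps hrest hclosed' c' hc').1 x hxc' (Or.inr hxc1)


-- ---- one saturation pass ----
theorem sstep_grows {s : PySem.Set Int} {g : List Int} {x : Int} (hx : x ∈ s) :
    x ∈ (if PySem.Set.isdisjoint s g = false then PySem.Set.update s g else s) := by
  split
  · exact (PySem.Set.mem_update _ _ _).2 (Or.inl hx)
  · exact hx

theorem pass1_grows (F : List (List Int)) (s : PySem.Set Int) :
    ∀ x ∈ s, x ∈ pass1 F s := by
  induction F generalizing s with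
  | nil => intro x hx; exact hx
  | cons g F ih =>
    intro x hx
    exact ih _ x (sstep_grows hx)

theorem pass1_sound {FB F : List (List Int)} {V0 : List Int} (hF : ∀ g ∈ F, g ∈ FB)
    {s : PySem.Set Int} (hs : ∀ x ∈ s, Reach FB V0 x) :
    ∀ x ∈ pass1 F s, Reach FB V0 x := by
  induction F generalizing s with
  | nil => exact hs
  | cons g F ih =>
    show ∀ x ∈ pass1 F (if PySem.Set.isdisjoint s g = false then PySem.Set.update s g else s),
      Reach FB V0 x
    refine ih (fun g' hg' => hF g' (List.mem_cons_of_mem _ hg')) ?_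
    intro x hx
    by_cases hd : PySem.Set.isdisjoint s g = false
    · rw [if_pos hd] at hx
      rcases (PySem.Set.mem_update _ _ _).1 hx with hxs | hxg
      · exact hs x hxs
      · rcases (isdisjoint_false_iff s g).1 hd with ⟨y, hyg, hys⟩
        exact .step (hF g (by simp)) hyg (hs y hys) hxg
    · rw [if_neg hd] at hx
      exact hs x hx

theorem pass1_absorb {F : List (List Int)} {g : List Int} (hg : g ∈ F)
    {s : PySem.Set Int} (ht : VTouch g s) : ∀ x ∈ g, x ∈ pass1 F s := by
  induction F generalizing s with
  | nil => cases hg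
  | cons g0 F ih =>
    intro x hx
    rcases List.mem_cons.1 hg with rfl | hg'
    · have hd : PySem.Set.isdisjoint s g = false := (isdisjoint_false_iff s g).2 ht
      show x ∈ pass1 F (if PySem.Set.isdisjoint s g = false then PySem.Set.update s g else s)
      rw [hd]
      simp only [if_pos]
      exact pass1_grows _ _ x ((PySem.Set.mem_update _ _ _).2 (Or.inr hx))
    · rcases ht with ⟨y, hyg, hys⟩
      exact ih hg' ⟨y, hyg, sstep_grows hys⟩ x hx

theorem pass1_of_closed {F : List (List Int)} {s : PySem.Set Int} (hc : ClosedF F s) :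
    pass1 F s = s := by
  induction F with
  | nil => rfl
  | cons g F ih =>
    have hstep : (if PySem.Set.isdisjoint s g = false then PySem.Set.update s g else s) = s := by
      split
      · next hd =>
        exact update_eq_self_of_subset (hc g (by simp) ((isdisjoint_false_iff s g).1 hd))
      · rfl
    show pass1 F (if PySem.Set.isdisjoint s g = false then PySem.Set.update s g else s) = s
    rw [hstep]
    exact ih (fun g' hg' => hc g' (List.mem_cons_of_mem _ hg'))

theorem iterPass_grows (F : List (List Int)) (k : Nat) (s : PySem.Set Int) :
    ∀ x ∈ s, x ∈ iterPass F k s := by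
  induction k generalizing s with
  | zero => intro x hx; exact hx
  | succ k ih => intro x hx; exact ih _ x (pass1_grows F s x hx)

theorem iterPass_sound {FB F : List (List Int)} {V0 : List Int} (hF : ∀ g ∈ F, g ∈ FB)
    (k : Nat) {s : PySem.Set Int} (hs : ∀ x ∈ s, Reach FB V0 x) :
    ∀ x ∈ iterPass F k s, Reach FB V0 x := by
  induction k generalizing s with
  | zero => exact hs
  | succ k ih => exact ih (pass1_sound hF hs)

theorem iterPass_of_closed {F : List (List Int)} {s : PySem.Set Int} (hc : ClosedF F s)
    (k : Nat) : iterPass F k s = s := by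
  induction k with
  | zero => rfl
  | succ k ih =>
    show iterPass F k (pass1 F s) = s
    rw [pass1_of_closed hc]
    exact ih

theorem iterPass_add (F : List (List Int)) (a b : Nat) (s : PySem.Set Int) :
    iterPass F (a + b) s = iterPass F a (iterPass F b s) := by
  induction b generalizing s with
  | zero => rfl
  | succ b ih =>
    show iterPass F (a + b + 1) s = _
    have : a + b + 1 = (a + b) + 1 := rfl
    rw [this]
    show iterPass F (a + b) (pass1 F s) = _
    rw [ih]
    rfl

-- ---- counting touched faces ----
theorem countP_mono_of_imp {l : List (List Int)} {p q : List Int → Bool}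
    (h : ∀ a ∈ l, p a = true → q a = true) : l.countP p ≤ l.countP q := by
  induction l with
  | nil => simp
  | cons a l ih =>
    rw [List.countP_cons, List.countP_cons]
    have hle := ih (fun b hb => h b (List.mem_cons_of_mem _ hb))
    by_cases hp : p a = true
    · have hq := h a (by simp) hp
      simp [hp, hq]; omega
    · simp only [Bool.not_eq_true] at hp
      simp [hp]; omega

theorem countP_lt_of_imp {l : List (List Int)} {p q : List Int → Bool}
    (h : ∀ a ∈ l, p a = true → q a = true)
    (hw : ∃ a ∈ l, q a = true ∧ p a = false) : l.countP p < l.countP q := by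
  induction l with
  | nil => simp at hw
  | cons a l ih =>
    rw [List.countP_cons, List.countP_cons]
    rcases hw with ⟨b, hb, hq, hp⟩
    rcases List.mem_cons.1 hb with rfl | hb'
    · have hle := countP_mono_of_imp (fun c hc => h c (List.mem_cons_of_mem _ hc))
      simp [hq, hp]; omega
    · have hlt := ih (fun c hc => h c (List.mem_cons_of_mem _ hc)) ⟨b, hb', hq, hp⟩
      by_cases hpa : p a = true
      · have hqa := h a (by simp) hpa
        simp [hpa, hqa]; omega
      · simp only [Bool.not_eq_true] at hpa
        simp [hpa]
        omega

theorem pass_dichotomy (F : List (List Int)) (s : PySem.Set Int) :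
    ClosedF F (pass1 F s) ∨ touched F s + 1 ≤ touched F (pass1 F s) := by
  by_cases hc : ClosedF F (pass1 F s)
  · exact Or.inl hc
  · right
    unfold ClosedF at hc
    push_neg at hc
    rcases hc with ⟨g, hgF, htg, x, hxg, hxn⟩
    have hnt : ¬ VTouch g s := by
      intro ht
      exact hxn (pass1_absorb hgF ht x hxg)
    have hlt : touched F s < touched F (pass1 F s) := by
      apply countP_lt_of_imp
      · intro a ha hp
        simp only [Bool.not_eq_true'] at hp ⊢
        rcases (isdisjoint_false_iff s a).1 hp with ⟨y, hya, hys⟩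
        exact (isdisjoint_false_iff _ a).2 ⟨y, hya, pass1_grows F s y hys⟩
      · refine ⟨g, hgF, ?_, ?_⟩
        · simp only [Bool.not_eq_true']
          exact (isdisjoint_false_iff _ g).2 htg
        · have hdt : PySem.Set.isdisjoint s g = true := by
            cases hcase : PySem.Set.isdisjoint s g
            · exact absurd ((isdisjoint_false_iff s g).1 hcase) hnt
            · rfl
          simp [hdt]
    omega

theorem iter_closed_or_grow (F : List (List Int)) :
    ∀ (k : Nat) (s : PySem.Set Int),
      (∃ j ≤ k, ClosedF F (iterPass F j s)) ∨ touched F s + k ≤ touched F (iterPass F k s) := by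
  intro k
  induction k with
  | zero => intro s; right; simp [iterPass]
  | succ k ih =>
    intro s
    rcases pass_dichotomy F s with hcl | hg
    · left
      refine ⟨1, by omega, ?_⟩
      show ClosedF F (iterPass F 0 (pass1 F s))
      exact hcl
    · rcases ih (pass1 F s) with ⟨j, hj, hcl⟩ | hg2
      · exact Or.inl ⟨j + 1, by omega, hcl⟩
      · right
        show touched F s + (k + 1) ≤ touched F (iterPass F k (pass1 F s))
        omega

theorem touched_le_length (F : List (List Int)) (s : PySem.Set Int) :
    touched F s ≤ F.length := List.countP_le_length

theorem closed_iter_of_pos {F : List (List Int)} {s : PySem.Set Int}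
    (h1 : 1 ≤ touched F s) : ClosedF F (iterPass F F.length s) := by
  rcases iter_closed_or_grow F F.length s with ⟨j, hj, hcl⟩ | hg
  · have : F.length = (F.length - j) + j := by omega
    rw [this, iterPass_add]
    rw [iterPass_of_closed hcl]
    exact hcl
  · have := touched_le_length F (iterPass F F.length s)
    omega

theorem closedF_nil (F : List (List Int)) : ClosedF F ([] : PySem.Set Int) := by
  intro g hg ht x hx
  rcases ht with ⟨y, _, hy⟩
  cases hy

-- the literal set A's saturation loops compute, and its characterization
def satC (F : List (List Int)) (V0 : List Int) : PySem.Set Int :=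
  iterPass F F.length (PySem.Set.ofList V0)

theorem satC_closed {F : List (List Int)} {V0 : List Int} (hV0 : V0 ∈ F) :
    ClosedF F (satC F V0) := by
  by_cases hne : V0 = []
  · subst hne
    unfold satC
    rw [show PySem.Set.ofList ([] : List Int) = ([] : PySem.Set Int) from rfl]
    rw [iterPass_of_closed (closedF_nil F)]
    exact closedF_nil F
  · apply closed_iter_of_pos
    have : 0 < touched F (PySem.Set.ofList V0) := by
      rw [touched, List.countP_pos_iff]
      refine ⟨V0, hV0, ?_⟩
      simp only [Bool.not_eq_true']
      rcases List.exists_mem_of_ne_nil V0 hne with ⟨u, hu⟩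
      exact (isdisjoint_false_iff _ _).2 ⟨u, hu, (PySem.Set.mem_ofList _ _).2 hu⟩
    omega

theorem satC_reach {F : List (List Int)} {V0 : List Int} (hV0 : V0 ∈ F) :
    ∀ x, x ∈ satC F V0 ↔ Reach F V0 x := by
  intro x
  constructor
  · exact fun hx => iterPass_sound (fun g hg => hg) F.length
      (fun y hy => .base ((PySem.Set.mem_ofList _ _).1 hy)) x hx
  · intro hr
    refine reach_elim (fun z => z ∈ satC F V0) ?_ ?_ hr
    · intro y hy
      exact iterPass_grows F F.length _ y ((PySem.Set.mem_ofList _ _).2 hy)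
    · intro g hg hex z hz
      rcases hex with ⟨y, hyg, hyin⟩
      exact satC_closed hV0 g hg ⟨y, hyg, hyin⟩ z hz


-- ---- A's loops with the used_v accumulator riding along ----
def ppass (F : List (List Int)) (st : PySem.Set Int × PySem.Set Int) :
    PySem.Set Int × PySem.Set Int := F.foldl pstep st

def ppassIter (F : List (List Int)) : Nat → (PySem.Set Int × PySem.Set Int) →
    PySem.Set Int × PySem.Set Int
  | 0, st => st
  | (k+1), st => ppassIter F k (ppass F st)

theorem pstep_fst (st : PySem.Set Int × PySem.Set Int) (g : List Int) :
    (pstep st g).1 = if PySem.Set.isdisjoint st.1 g = false then PySem.Set.update st.1 g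
      else st.1 := by
  unfold pstep
  split <;> rfl

theorem ppass_fst (F : List (List Int)) (st : PySem.Set Int × PySem.Set Int) :
    (ppass F st).1 = pass1 F st.1 := by
  induction F generalizing st with
  | nil => rfl
  | cons g F ih =>
    show (ppass F (pstep st g)).1 = pass1 F (if PySem.Set.isdisjoint st.1 g = false
      then PySem.Set.update st.1 g else st.1)
    rw [ih, pstep_fst]

theorem touchAny_mono {F : List (List Int)} {s s' : List Int} (h : ∀ x ∈ s, x ∈ s')
    (ht : TouchAny F s) : TouchAny F s' := by
  rcases ht with ⟨g, hg, x, hxg, hxs⟩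
  exact ⟨g, hg, x, hxg, h x hxs⟩

theorem ppass_snd (F : List (List Int)) (st : PySem.Set Int × PySem.Set Int) :
    ∀ x, x ∈ (ppass F st).2 ↔
      x ∈ st.2 ∨ (x ∈ (ppass F st).1 ∧ TouchAny F (ppass F st).1) := by
  induction F using List.reverseRecOn with
  | nil =>
    intro x
    simp [ppass, TouchAny]
  | append_singleton F g ih =>
    intro x
    have happ : ppass (F ++ [g]) st = pstep (ppass F st) g := by
      unfold ppass
      rw [List.foldl_append]
      rfl
    by_cases hd : PySem.Set.isdisjoint (ppass F st).1 g = false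
    · have hr : pstep (ppass F st) g =
        (PySem.Set.update (ppass F st).1 g,
         PySem.Set.update (ppass F st).2 (PySem.Set.update (ppass F st).1 g)) := by
        unfold pstep
        rw [if_pos hd]
      have hTA : TouchAny (F ++ [g]) (pstep (ppass F st) g).1 := by
        rcases (isdisjoint_false_iff _ g).1 hd with ⟨y, hyg, hys⟩
        refine ⟨g, by simp, y, hyg, ?_⟩
        rw [hr]
        exact (PySem.Set.mem_update _ _ _).2 (Or.inl hys)
      rw [happ, hr] at *
      constructor
      · intro hx
        rcases (PySem.Set.mem_update _ _ _).1 hx with hx2 | hx1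
        · rcases (ih x).1 hx2 with hst | ⟨hmem, _⟩
          · exact Or.inl hst
          · exact Or.inr ⟨(PySem.Set.mem_update _ _ _).2 (Or.inl hmem), hTA⟩
        · exact Or.inr ⟨hx1, hTA⟩
      · intro hx
        rcases hx with hst | ⟨hmem, _⟩
        · exact (PySem.Set.mem_update _ _ _).2 (Or.inl ((ih x).2 (Or.inl hst)))
        · exact (PySem.Set.mem_update _ _ _).2 (Or.inr hmem)
    · have hdt : PySem.Set.isdisjoint (ppass F st).1 g = true := by
        cases hcase : PySem.Set.isdisjoint (ppass F st).1 g
        · exact absurd hcase hd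
        · rfl
      have hr : pstep (ppass F st) g = ppass F st := by
        unfold pstep
        rw [hdt]
        simp
      rw [happ, hr]
      have hTAiff : TouchAny (F ++ [g]) (ppass F st).1 ↔ TouchAny F (ppass F st).1 := by
        constructor
        · rintro ⟨g', hg', hv⟩
          rcases List.mem_append.1 hg' with hg'' | hg''
          · exact ⟨g', hg'', hv⟩
          · rw [List.mem_singleton.1 hg''] at hv
            have := (isdisjoint_false_iff (ppass F st).1 g).2 hv
            rw [hdt] at this
            cases this
        · rintro ⟨g', hg', hv⟩
          exact ⟨g', List.mem_append_left _ hg', hv⟩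
      rw [hTAiff]
      exact ih x

theorem ppassIter_fst (F : List (List Int)) (k : Nat) (st : PySem.Set Int × PySem.Set Int) :
    (ppassIter F k st).1 = iterPass F k st.1 := by
  induction k generalizing st with
  | zero => rfl
  | succ k ih =>
    show (ppassIter F k (ppass F st)).1 = iterPass F k (pass1 F st.1)
    rw [ih, ppass_fst]

theorem ppassIter_snd (F : List (List Int)) (k : Nat) (st : PySem.Set Int × PySem.Set Int) :
    ∀ x, x ∈ (ppassIter F k st).2 ↔
      x ∈ st.2 ∨ (0 < k ∧ x ∈ (ppassIter F k st).1 ∧ TouchAny F (ppassIter F k st).1) := by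
  induction k generalizing st with
  | zero => intro x; simp [ppassIter]
  | succ k ih =>
    intro x
    show x ∈ (ppassIter F k (ppass F st)).2 ↔ _
    have hgrow : ∀ y, y ∈ (ppass F st).1 → y ∈ (ppassIter F k (ppass F st)).1 := by
      intro y hy
      rw [ppassIter_fst]
      exact iterPass_grows F k _ y hy
    constructor
    · intro hx
      rcases (ih (ppass F st) x).1 hx with hx2 | ⟨hk, hmem, hta⟩
      · rcases (ppass_snd F st x).1 hx2 with hst | ⟨hmem, hta⟩
        · exact Or.inl hst
        · exact Or.inr ⟨by omega, hgrow x hmem,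
            touchAny_mono hgrow hta⟩
      · exact Or.inr ⟨by omega, hmem, hta⟩
    · intro hx
      rcases hx with hst | ⟨_, hmem, hta⟩
      · exact (ih (ppass F st) x).2 (Or.inl ((ppass_snd F st x).2 (Or.inl hst)))
      · rcases Nat.eq_zero_or_pos k with rfl | hk
        · exact (ppass_snd F st x).2 (Or.inr ⟨hmem, hta⟩)
        · exact (ih (ppass F st) x).2 (Or.inr ⟨hk, hmem, hta⟩)


theorem isdisjoint_true_of_not_touch {s g : List Int} (h : ¬ VTouch g s) :
    PySem.Set.isdisjoint s g = true := by
  cases hcase : PySem.Set.isdisjoint s g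
  · exact absurd ((isdisjoint_false_iff s g).1 hcase) h
  · rfl

theorem iterPass_nil_set (F : List (List Int)) (k : Nat) :
    iterPass F k ([] : PySem.Set Int) = [] := iterPass_of_closed (closedF_nil F) k

theorem foldl_const_ppass (F : List (List Int)) :
    ∀ (l : List Int) (st : PySem.Set Int × PySem.Set Int),
      l.foldl (fun st2 (_ : Int) => ppass F st2) st = ppassIter F l.length st := by
  intro l
  induction l with
  | nil => intro st; rfl
  | cons a l ih =>
    intro st
    show l.foldl _ (ppass F st) = ppassIter F (l.length + 1) st
    rw [ih (ppass F st)]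
    rfl

theorem aILoop_eq (f : List (List Int)) (z : Nat) (st : PySem.Set Int × PySem.Set Int) :
    aILoop f (z : Int) st = ppassIter (f.drop z) (f.drop z).length st := by
  unfold aILoop
  have hinner : ∀ st2, (PySem.List.pyRange (z : Int) (PySem.List.len f) 1).foldl
      (aAbsorb f) st2 = ppass (f.drop z) st2 := by
    intro st2
    have h := PySem.List.foldl_pyRange_pyGetD f ([] : List Int) pstep st2
      (a := (z : Int)) (Int.natCast_nonneg z)
    rw [show aAbsorb f = (fun acc j => pstep acc (PySem.List.pyGetD f j [])) from rfl]
    rw [h]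
    simp [ppass]
  have hfun : (fun (st2 : PySem.Set Int × PySem.Set Int) (_i : Int) =>
      (PySem.List.pyRange (z : Int) (PySem.List.len f) 1).foldl (aAbsorb f) st2)
      = fun st2 _i => ppass (f.drop z) st2 := by
    funext st2 _i
    exact hinner st2
  rw [hfun, foldl_const_ppass]
  congr 1
  rw [PySem.List.length_pyRange_one, List.length_drop]
  simp only [PySem.List.len_eq]
  omega

-- the value-level body of A's 'for x' loop
def xstep (f : List (List Int)) (z : Int)
    (st : PySem.Set Int × PySem.Set Int × List (List Int)) (gx : List Int) :
    PySem.Set Int × PySem.Set Int × List (List Int) :=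
  let st3 := aILoop f z (st.1, st.2.1)
  if PySem.Set.isdisjoint st3.1 gx = false then (st3.1, st3.2, st.2.2 ++ [gx])
  else (st3.1, st3.2, st.2.2)

theorem xfold_eq (f : List (List Int)) (z : Nat)
    (init : PySem.Set Int × PySem.Set Int × List (List Int)) :
    (PySem.List.pyRange (z : Int) (PySem.List.len f) 1).foldl (aXBody f (z : Int)) init
      = (f.drop z).foldl (xstep f (z : Int)) init := by
  have h := PySem.List.foldl_pyRange_pyGetD f ([] : List Int) (xstep f (z : Int)) init
    (a := (z : Int)) (Int.natCast_nonneg z)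
  rw [show aXBody f (z : Int) = (fun acc j => xstep f (z : Int) acc (PySem.List.pyGetD f j []))
    from rfl]
  rw [h]
  simp

theorem pstep_stable {C uv : PySem.Set Int} {g : List Int}
    (hcg : VTouch g C → ∀ x ∈ g, x ∈ C) (huv : ∀ x ∈ C, x ∈ uv) :
    pstep (C, uv) g = (C, uv) := by
  unfold pstep
  by_cases hd : PySem.Set.isdisjoint C g = false
  · rw [if_pos hd]
    have hup : PySem.Set.update C g = C :=
      update_eq_self_of_subset (hcg ((isdisjoint_false_iff C g).1 hd))
    simp only [hup]
    rw [update_eq_self_of_subset huv]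
  · rw [if_neg hd]

theorem ppass_stable {F : List (List Int)} {C uv : PySem.Set Int}
    (hC : ClosedF F C) (huv : ∀ x ∈ C, x ∈ uv) : ppass F (C, uv) = (C, uv) := by
  induction F with
  | nil => rfl
  | cons g F ih =>
    show ppass F (pstep (C, uv) g) = (C, uv)
    rw [pstep_stable (hC g (by simp)) huv]
    exact ih (fun g' hg' => hC g' (List.mem_cons_of_mem _ hg'))

theorem ppassIter_stable {F : List (List Int)} {C uv : PySem.Set Int}
    (hC : ClosedF F C) (huv : ∀ x ∈ C, x ∈ uv) (k : Nat) :
    ppassIter F k (C, uv) = (C, uv) := by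
  induction k with
  | zero => rfl
  | succ k ih =>
    show ppassIter F k (ppass F (C, uv)) = (C, uv)
    rw [ppass_stable hC huv]
    exact ih

theorem xrest (f : List (List Int)) (z : Nat) {C uv' : PySem.Set Int}
    (hC : ClosedF (f.drop z) C) (huv' : ∀ x ∈ C, x ∈ uv') :
    ∀ (L : List (List Int)) (acc : List (List Int)),
      L.foldl (xstep f (z : Int)) (C, uv', acc)
        = (C, uv', acc ++ L.filter (fun g => !(PySem.Set.isdisjoint C g))) := by
  intro L
  induction L with
  | nil => intro acc; simp
  | cons g L ih =>
    intro acc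
    have hst3 : aILoop f (z : Int) (C, uv') = (C, uv') := by
      rw [aILoop_eq]
      exact ppassIter_stable hC huv' _
    have hx : xstep f (z : Int) (C, uv', acc) g =
        if PySem.Set.isdisjoint C g = false then (C, uv', acc ++ [g]) else (C, uv', acc) := by
      unfold xstep
      simp only [hst3]
    rw [List.foldl_cons, hx]
    by_cases hd : PySem.Set.isdisjoint C g = false
    · rw [if_pos hd, ih (acc ++ [g])]
      rw [List.filter_cons_of_pos (by simp [hd]), List.append_assoc]
      rfl
    · rw [if_neg hd]
      have hdt : PySem.Set.isdisjoint C g = true := by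
        cases hcase : PySem.Set.isdisjoint C g
        · exact absurd hcase hd
        · rfl
      rw [ih acc, List.filter_cons_of_neg (by simp [hdt])]

theorem xloop_eq (f : List (List Int)) (z : Nat) {h : List Int} {rest1 : List (List Int)}
    (hdrop : f.drop z = h :: rest1) (uv : PySem.Set Int) :
    (f.drop z).foldl (xstep f (z : Int)) (PySem.Set.ofList h, uv, [])
      = (satC (f.drop z) h,
         (ppassIter (f.drop z) (f.drop z).length (PySem.Set.ofList h, uv)).2,
         (f.drop z).filter (fun g => !(PySem.Set.isdisjoint (satC (f.drop z) h) g))) := by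
  set F := f.drop z with hF
  set C := satC F h with hC
  have hhF : h ∈ F := by rw [hdrop]; simp
  have hclosed : ClosedF F C := satC_closed hhF
  have hst3 : aILoop f (z : Int) (PySem.Set.ofList h, uv)
      = ppassIter F F.length (PySem.Set.ofList h, uv) := aILoop_eq f z _
  have hfst : (ppassIter F F.length (PySem.Set.ofList h, uv)).1 = C := by
    rw [ppassIter_fst]
    rfl
  set uv1 := (ppassIter F F.length (PySem.Set.ofList h, uv)).2 with huv1
  have huv1C : ∀ x ∈ C, x ∈ uv1 := by
    intro x hx
    rw [huv1]
    apply (ppassIter_snd F F.length (PySem.Set.ofList h, uv) x).2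
    right
    refine ⟨by rw [hdrop]; simp, by rw [hfst]; exact hx, ?_⟩
    -- TouchAny F (ppassIter ...).1
    rw [hfst]
    have hhne : h ≠ [] := by
      intro hnil
      rw [hnil] at hC
      have : C = [] := by
        rw [hC]
        unfold satC
        exact iterPass_nil_set F F.length
      rw [this] at hx
      cases hx
    rcases List.exists_mem_of_ne_nil h hhne with ⟨u, hu⟩
    exact ⟨h, hhF, u, hu, iterPass_grows F F.length _ u ((PySem.Set.mem_ofList _ _).2 hu)⟩
  conv_lhs => rw [hdrop]
  show rest1.foldl (xstep f (z : Int)) (xstep f (z : Int) (PySem.Set.ofList h, uv, []) h) = _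
  have hp : (ppassIter F F.length (PySem.Set.ofList h, uv)) = (C, uv1) := by
    rw [huv1, ← hfst]
  have hfirst : xstep f (z : Int) (PySem.Set.ofList h, uv, []) h
      = (C, uv1, List.filter (fun g => !(PySem.Set.isdisjoint C g)) [h]) := by
    unfold xstep
    simp only [hst3, hp]
    cases hd : PySem.Set.isdisjoint C h <;> simp [hd]
  rw [hfirst, xrest f z hclosed huv1C rest1 _]
  rw [← List.filter_append]
  rw [show ([h] : List (List Int)) ++ rest1 = F by rw [hdrop]; rfl]

theorem xloop_snd_mem (f : List (List Int)) (z : Nat) {h : List Int} {rest1 : List (List Int)}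
    (hdrop : f.drop z = h :: rest1) (uv : PySem.Set Int) :
    ∀ x, x ∈ (ppassIter (f.drop z) (f.drop z).length (PySem.Set.ofList h, uv)).2 ↔
      x ∈ uv ∨ x ∈ satC (f.drop z) h := by
  intro x
  have hfst : (ppassIter (f.drop z) (f.drop z).length (PySem.Set.ofList h, uv)).1
      = satC (f.drop z) h := by
    rw [ppassIter_fst]
    rfl
  constructor
  · intro hx
    rcases (ppassIter_snd _ _ _ x).1 hx with hxu | ⟨_, hmem, _⟩
    · exact Or.inl hxu
    · right; rw [← hfst]; exact hmem
  · intro hx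
    rcases hx with hxu | hxC
    · exact (ppassIter_snd _ _ _ x).2 (Or.inl hxu)
    · apply (ppassIter_snd _ _ _ x).2
      right
      refine ⟨by rw [hdrop]; simp, by rw [hfst]; exact hxC, ?_⟩
      rw [hfst]
      have hhne : h ≠ [] := by
        intro hnil
        rw [hnil] at hxC
        unfold satC at hxC
        rw [show PySem.Set.ofList ([] : List Int) = ([] : PySem.Set Int) from rfl,
          iterPass_nil_set] at hxC
        cases hxC
      rcases List.exists_mem_of_ne_nil h hhne with ⟨u, hu⟩
      exact ⟨h, by rw [hdrop]; simp, u, hu,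
        iterPass_grows _ _ _ u ((PySem.Set.mem_ofList _ _).2 hu)⟩

theorem reach_drop_eq (f : List (List Int)) (z : Nat) {h : List Int} (used : Int → Prop)
    (hIcl : ∀ g ∈ f, (∃ x ∈ g, used x) → ∀ x ∈ g, used x)
    (hIcov : ∀ g ∈ f.take z, ∀ x ∈ g, used x)
    (hnu : ∀ x ∈ h, ¬ used x) :
    ∀ x, Reach (f.drop z) h x ↔ Reach f h x := by
  intro x
  constructor
  · exact reach_mono (fun g hg => (List.drop_sublist z f).subset hg)
  · intro hr
    refine reach_elim (fun y => Reach (f.drop z) h y) (fun y hy => .base hy) ?_ hr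
    intro g hgf hex y' hy'
    have hsplit : g ∈ f.take z ++ f.drop z := by
      rw [List.take_append_drop]; exact hgf
    rcases List.mem_append.1 hsplit with hgt | hgd
    · rcases hex with ⟨y, hyg, hry⟩
      have hnu2 := reach_not_used (F := f.drop z) used
        (fun g' hg' => hIcl g' ((List.drop_sublist z f).subset hg')) hnu y hry
      exact absurd (hIcov g hgt y hyg) hnu2
    · rcases hex with ⟨y, hyg, hry⟩
      exact .step hgd hyg hry hy'

theorem A_outer (f : List (List Int)) :
    ∀ {rest : List (List Int)} {used : Int → Prop} {cs : List (List Int)},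
      Scan f rest used cs →
      ∀ (z : Nat), f.drop z = rest →
      ∀ (acc : List (List (List Int))) (uv : PySem.Set Int),
      (∀ x, x ∈ uv ↔ used x) →
      (∀ g ∈ f, (∃ x ∈ g, used x) → ∀ x ∈ g, used x) →
      (∀ g ∈ f.take z, ∀ x ∈ g, used x) →
      ((PySem.List.pyRange (z : Int) (PySem.List.len f) 1).foldl (aZBody f) (acc, uv)).1
        = acc ++ cs.map (fun c => f.filter (fun g => !(PySem.Set.isdisjoint c g))) := by
  intro rest used cs hs
  induction hs with
  | @nil used0 =>
    intro z hdrop acc uv hIuv hIcl hIcov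
    have hlen : f.length ≤ z := by
      have hlg := congrArg List.length hdrop
      simp only [List.length_drop, List.length_nil] at hlg
      omega
    rw [PySem.List.pyRange_one_eq_nil (by simp only [PySem.List.len_eq]; omega)]
    simp
  | @skip h rest1 used1 cs1 htouch hrest ih =>
    intro z hdrop acc uv hIuv hIcl hIcov
    have hzlt : z < f.length := by
      have hlg := congrArg List.length hdrop
      simp only [List.length_drop, List.length_cons] at hlg
      omega
    have h0 : f[z]? = some h := by
      have h1 : (f.drop z)[0]? = some h := by rw [hdrop]; rfl
      rw [List.getElem?_drop] at h1
      simpa using h1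
    have hfz : PySem.List.pyGetD f (z : Int) [] = h := by
      rw [PySem.List.pyGetD_natCast, List.getD_eq_getElem?_getD, h0]
      rfl
    rw [PySem.List.pyRange_one_cons (by simp only [PySem.List.len_eq]; omega), List.foldl_cons]
    have hd : PySem.Set.isdisjoint uv h = false := by
      rcases htouch with ⟨x, hx, hxu⟩
      exact (isdisjoint_false_iff uv h).2 ⟨x, hx, (hIuv x).2 hxu⟩
    have hzb : aZBody f (acc, uv) (z : Int) = (acc, uv) := by
      unfold aZBody
      simp only [hfz, hd, if_pos]
    rw [hzb]
    have hdrop' : f.drop (z + 1) = rest1 := by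
      have h1 := congrArg (List.drop 1) hdrop
      rw [List.drop_drop] at h1
      simpa [Nat.add_comm] using h1
    have hIcov' : ∀ g ∈ f.take (z + 1), ∀ x ∈ g, used1 x := by
      intro g hg
      rw [List.take_succ, h0] at hg
      rcases List.mem_append.1 hg with hgt | hgh
      · exact hIcov g hgt
      · have : g = h := by simpa using hgh
        subst this
        rcases htouch with ⟨y, hy, hyu⟩
        exact hIcl g (List.mem_of_mem_drop (hdrop ▸ List.mem_cons_self ..)) ⟨y, hy, hyu⟩
    have hcast : (z : Int) + 1 = ((z + 1 : Nat) : Int) := by push_cast; ring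
    rw [hcast]
    exact ih (z + 1) hdrop' acc uv hIuv hIcl hIcov'
  | @lead h rest1 used1 c cs1 hhf hnu hchar hrest ih =>
    intro z hdrop acc uv hIuv hIcl hIcov
    have hzlt : z < f.length := by
      have hlg := congrArg List.length hdrop
      simp only [List.length_drop, List.length_cons] at hlg
      omega
    have h0 : f[z]? = some h := by
      have h1 : (f.drop z)[0]? = some h := by rw [hdrop]; rfl
      rw [List.getElem?_drop] at h1
      simpa using h1
    have hfz : PySem.List.pyGetD f (z : Int) [] = h := by
      rw [PySem.List.pyGetD_natCast, List.getD_eq_getElem?_getD, h0]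
      rfl
    have hhF : h ∈ f.drop z := by rw [hdrop]; simp
    have hdt : PySem.Set.isdisjoint uv h = true := by
      apply isdisjoint_true_of_not_touch
      rintro ⟨x, hxh, hxuv⟩
      exact hnu x hxh ((hIuv x).1 hxuv)
    -- the component set and its characterization
    set C := satC (f.drop z) h with hCdef
    have hCc : ∀ x, x ∈ C ↔ x ∈ c := by
      intro x
      rw [hCdef, satC_reach hhF x,
        reach_drop_eq f z used1 hIcl hIcov hnu x, ← hchar x]
    have hfaces : (f.drop z).filter (fun g => !(PySem.Set.isdisjoint C g))
        = f.filter (fun g => !(PySem.Set.isdisjoint c g)) := by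
      have h2 : (f.drop z).filter (fun g => !(PySem.Set.isdisjoint C g))
          = (f.drop z).filter (fun g => !(PySem.Set.isdisjoint c g)) := by
        apply List.filter_congr
        intro g _
        rw [isdisjoint_congr g hCc]
      have h3 : (f.take z).filter (fun g => !(PySem.Set.isdisjoint c g)) = [] := by
        apply List.filter_eq_nil_iff.2
        intro g hgt
        have ht : PySem.Set.isdisjoint c g = true := by
          apply isdisjoint_true_of_not_touch
          rintro ⟨x, hxg, hxc⟩
          have hused : used1 x := hIcov g hgt x hxg
          exact reach_not_used used1 hIcl hnu x ((hchar x).1 hxc) hused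
        simp [ht]
      conv_rhs => rw [← List.take_append_drop z f]
      rw [List.filter_append, h3, List.nil_append, h2]
    rw [PySem.List.pyRange_one_cons (by simp only [PySem.List.len_eq]; omega), List.foldl_cons]
    have hzb : aZBody f (acc, uv) (z : Int)
        = (acc ++ [f.filter (fun g => !(PySem.Set.isdisjoint c g))],
           (ppassIter (f.drop z) (f.drop z).length (PySem.Set.ofList h, uv)).2) := by
      unfold aZBody
      simp only [hfz, hdt]
      rw [if_neg (by simp)]
      rw [xfold_eq f z, xloop_eq f z hdrop uv]
      rw [← hCdef, hfaces]
    rw [hzb]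
    have hdrop' : f.drop (z + 1) = rest1 := by
      have h1 := congrArg (List.drop 1) hdrop
      rw [List.drop_drop] at h1
      simpa [Nat.add_comm] using h1
    have hIuv' : ∀ x, x ∈ (ppassIter (f.drop z) (f.drop z).length
        (PySem.Set.ofList h, uv)).2 ↔ used1 x ∨ x ∈ c := by
      intro x
      rw [xloop_snd_mem f z hdrop uv x, ← hCdef]
      exact or_congr (hIuv x) (hCc x)
    have hIcl' := scan_closed_extend hIcl hchar
    have hIcov' : ∀ g ∈ f.take (z + 1), ∀ x ∈ g, used1 x ∨ x ∈ c := by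
      intro g hg
      rw [List.take_succ, h0] at hg
      rcases List.mem_append.1 hg with hgt | hgh
      · exact fun x hx => Or.inl (hIcov g hgt x hx)
      · have : g = h := by simpa using hgh
        subst this
        exact fun x hx => Or.inr ((hchar x).2 (.base hx))
    have hcast : (z : Int) + 1 = ((z + 1 : Nat) : Int) := by push_cast; ring
    rw [hcast]
    rw [ih (z + 1) hdrop' (acc ++ [f.filter (fun g => !(PySem.Set.isdisjoint c g))]) _
      hIuv' hIcl' hIcov']
    simp


-- ---- B's fold equals the recursive merge ----
def bAssemble (st : List (PySem.Set Int) × Option Int × PySem.Set Int) :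
    List (PySem.Set Int) :=
  match st.2.1 with
  | none => st.1 ++ [st.2.2]
  | some p => PySem.List.insert st.1 p st.2.2

theorem absorbR_nil (vs : PySem.Set Int) : absorbR [] vs = (vs, []) := rfl

theorem absorbR_cons (c : PySem.Set Int) (cs : List (PySem.Set Int)) (vs : PySem.Set Int) :
    absorbR (c :: cs) vs =
      if PySem.Set.isdisjoint c vs then ((absorbR cs vs).1, c :: (absorbR cs vs).2)
      else absorbR cs (PySem.Set.union vs c) := rfl

theorem mergeR_nil (vs : PySem.Set Int) : mergeR [] vs = [vs] := rfl

theorem mergeR_cons (c : PySem.Set Int) (cs : List (PySem.Set Int)) (vs : PySem.Set Int) :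
    mergeR (c :: cs) vs =
      if PySem.Set.isdisjoint c vs then c :: mergeR cs vs
      else (absorbR cs (PySem.Set.union vs c)).1 :: (absorbR cs (PySem.Set.union vs c)).2 := rfl

theorem bfold_some (cs : List (PySem.Set Int)) :
    ∀ (keep1 keep2 : List (PySem.Set Int)) (vs : PySem.Set Int),
      bAssemble (cs.foldl bScanBody (keep1 ++ keep2, some ((keep1.length : Int)), vs))
        = keep1 ++ (absorbR cs vs).1 :: (keep2 ++ (absorbR cs vs).2) := by
  induction cs with
  | nil =>
    intro keep1 keep2 vs
    show bAssemble (keep1 ++ keep2, some ((keep1.length : Int)), vs) = _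
    unfold bAssemble
    simp only []
    rw [PySem.List.insert_natCast _ _ _ (by simp)]
    rw [List.take_left, List.drop_left]
    simp [absorbR_nil]
  | cons c cs ih =>
    intro keep1 keep2 vs
    rw [List.foldl_cons]
    by_cases hd : PySem.Set.isdisjoint c vs = true
    · have hb : bScanBody (keep1 ++ keep2, some ((keep1.length : Int)), vs) c
          = (keep1 ++ (keep2 ++ [c]), some ((keep1.length : Int)), vs) := by
        unfold bScanBody
        rw [if_pos hd]
        simp
      rw [hb, ih keep1 (keep2 ++ [c]) vs]
      simp [absorbR_cons, hd]
    · have hdf : PySem.Set.isdisjoint c vs = false := Bool.eq_false_iff.2 hd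
      have hb : bScanBody (keep1 ++ keep2, some ((keep1.length : Int)), vs) c
          = (keep1 ++ keep2, some ((keep1.length : Int)), PySem.Set.union vs c) := by
        unfold bScanBody
        rw [if_neg (by simp [hdf])]
        rfl
      rw [hb, ih keep1 keep2 (PySem.Set.union vs c)]
      simp [absorbR_cons, hdf]

theorem bfold_none (cs : List (PySem.Set Int)) :
    ∀ (keep : List (PySem.Set Int)) (vs : PySem.Set Int),
      bAssemble (cs.foldl bScanBody (keep, none, vs)) = keep ++ mergeR cs vs := by
  induction cs with
  | nil => intro keep vs; rfl
  | cons c cs ih =>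
    intro keep vs
    rw [List.foldl_cons]
    by_cases hd : PySem.Set.isdisjoint c vs = true
    · have hb : bScanBody (keep, none, vs) c = (keep ++ [c], none, vs) := by
        unfold bScanBody
        rw [if_pos hd]
      rw [hb, ih (keep ++ [c]) vs]
      simp [mergeR_cons, hd]
    · have hdf : PySem.Set.isdisjoint c vs = false := Bool.eq_false_iff.2 hd
      have hb : bScanBody (keep, none, vs) c
          = (keep, some ((keep.length : Int)), PySem.Set.union vs c) := by
        unfold bScanBody
        rw [if_neg (by simp [hdf])]
        simp [PySem.List.len_eq]
      rw [hb]
      have h2 := bfold_some cs keep [] (PySem.Set.union vs c)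
      simp only [List.nil_append, List.append_nil] at h2
      rw [h2]
      simp [mergeR_cons, hdf]

theorem bStep_eq_mergeR (comps : List (PySem.Set Int)) (face : List Int) :
    bStep comps face = mergeR comps (PySem.Set.ofList face) := by
  have h := bfold_none comps [] (PySem.Set.ofList face)
  rw [List.nil_append] at h
  exact h

-- ---- what absorbR computes ----
theorem absorbR_spec (g0 : List Int) :
    ∀ (cs : List (PySem.Set Int)) (vs : PySem.Set Int),
      (∀ x ∈ g0, x ∈ vs) →
      (∀ c' ∈ cs, ∀ x ∈ c', x ∈ vs → x ∈ g0) →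
      cs.Pairwise (fun c c' => ∀ x, x ∈ c → x ∉ c') →
      (∀ x, x ∈ (absorbR cs vs).1 ↔
          x ∈ vs ∨ ∃ c' ∈ cs, (∃ y ∈ c', y ∈ g0) ∧ x ∈ c')
        ∧ (absorbR cs vs).2 = cs.filter (fun c' => PySem.Set.isdisjoint c' g0) := by
  intro cs
  induction cs with
  | nil =>
    intro vs hsub hvs hpair
    constructor
    · intro x; simp [absorbR_nil]
    · simp [absorbR_nil]
  | cons c cs ih =>
    intro vs hsub hvs hpair
    by_cases hd : PySem.Set.isdisjoint c vs = true
    · have hcg : ∀ y ∈ c, y ∉ g0 := by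
        intro y hy hyg
        exact (PySem.Set.isdisjoint_iff _ _).1 hd y hy (hsub y hyg)
      have hcd : PySem.Set.isdisjoint c g0 = true :=
        (PySem.Set.isdisjoint_iff _ _).2 hcg
      have hrec := ih vs hsub (fun c' hc' => hvs c' (List.mem_cons_of_mem _ hc'))
        (List.Pairwise.sublist (List.sublist_cons_self _ _) hpair)
      constructor
      · intro x
        rw [absorbR_cons, if_pos hd]
        show x ∈ (absorbR cs vs).1 ↔ _
        rw [(hrec.1 x)]
        constructor
        · rintro (hxv | ⟨c', hc', hty, hxc⟩)
          · exact Or.inl hxv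
          · exact Or.inr ⟨c', List.mem_cons_of_mem _ hc', hty, hxc⟩
        · rintro (hxv | ⟨c', hc', ⟨y, hyc, hyg⟩, hxc⟩)
          · exact Or.inl hxv
          · rcases List.mem_cons.1 hc' with rfl | hc''
            · exact absurd hyg (hcg y hyc)
            · exact Or.inr ⟨c', hc'', ⟨y, hyc, hyg⟩, hxc⟩
      · rw [absorbR_cons, if_pos hd]
        show c :: (absorbR cs vs).2 = _
        rw [List.filter_cons_of_pos (by simp [hcd])]
        rw [hrec.2]
    · have hdf : PySem.Set.isdisjoint c vs = false := Bool.eq_false_iff.2 hd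
      rcases (isdisjoint_false_iff c vs).1 hdf with ⟨y0, hy0v, hy0c⟩
      have hy0g : y0 ∈ g0 := hvs c (by simp) y0 hy0c hy0v
      have hcd : PySem.Set.isdisjoint c g0 = false :=
        (isdisjoint_false_iff c g0).2 ⟨y0, hy0g, hy0c⟩
      have hsub' : ∀ x ∈ g0, x ∈ PySem.Set.union vs c :=
        fun x hx => (PySem.Set.mem_union _ _ _).2 (Or.inl (hsub x hx))
      have hvs' : ∀ c' ∈ cs, ∀ x ∈ c', x ∈ PySem.Set.union vs c → x ∈ g0 := by
        intro c' hc' x hxc' hxu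
        rcases (PySem.Set.mem_union _ _ _).1 hxu with hxv | hxc
        · exact hvs c' (List.mem_cons_of_mem _ hc') x hxc' hxv
        · exact absurd hxc' (List.rel_of_pairwise_cons hpair hc' x hxc)
      have hrec := ih (PySem.Set.union vs c) hsub' hvs'
        (List.Pairwise.sublist (List.sublist_cons_self _ _) hpair)
      constructor
      · intro x
        rw [absorbR_cons, if_neg (by simp [hdf])]
        rw [(hrec.1 x)]
        constructor
        · rintro (hxu | ⟨c', hc', hty, hxc⟩)
          · rcases (PySem.Set.mem_union _ _ _).1 hxu with hxv | hxc
            · exact Or.inl hxv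
            · exact Or.inr ⟨c, by simp, ⟨y0, hy0c, hy0g⟩, hxc⟩
          · exact Or.inr ⟨c', List.mem_cons_of_mem _ hc', hty, hxc⟩
        · rintro (hxv | ⟨c', hc', hty, hxc⟩)
          · exact Or.inl ((PySem.Set.mem_union _ _ _).2 (Or.inl hxv))
          · rcases List.mem_cons.1 hc' with rfl | hc''
            · exact Or.inl ((PySem.Set.mem_union _ _ _).2 (Or.inr hxc))
            · exact Or.inr ⟨c', hc'', hty, hxc⟩
      · rw [absorbR_cons, if_neg (by simp [hdf])]
        rw [List.filter_cons_of_neg (by simp [hcd])]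
        exact hrec.2


-- a component meeting no vertex of g keeps its closure when g is appended
theorem ext_char_of_disjoint {fs : List (List Int)} {g h' c' : List Int}
    (hchar : ∀ x, x ∈ c' ↔ Reach fs h' x) (hnt : ∀ y ∈ c', y ∉ g) :
    ∀ x, x ∈ c' ↔ Reach (fs ++ [g]) h' x := by
  intro x
  constructor
  · exact fun hx => reach_mono (fun t ht => List.mem_append_left _ ht) ((hchar x).1 hx)
  · intro hr
    refine reach_elim (fun z => z ∈ c') (fun y hy => (hchar y).2 (.base hy)) ?_ hr
    intro t ht hex z hz
    rcases hex with ⟨y, hyt, hyc⟩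
    rcases List.mem_append.1 ht with htf | htg
    · exact (hchar z).2 (.step htf hyt ((hchar y).1 hyc) hz)
    · rw [List.mem_singleton.1 htg] at hyt
      exact absurd hyt (hnt y hyc)

theorem pairwise_disj_both {cs : List (List Int)}
    (hp : cs.Pairwise (fun c c' => ∀ x, x ∈ c → x ∉ c')) :
    ∀ c ∈ cs, ∀ c' ∈ cs, c ≠ c' → ∀ x, x ∈ c → x ∉ c' := by
  induction cs with
  | nil => intro c hc; cases hc
  | cons a cs ih =>
    intro c hc c' hc' hne x hxc hxc'
    rcases List.mem_cons.1 hc with rfl | hc2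
    · rcases List.mem_cons.1 hc' with rfl | hc2'
      · exact hne rfl
      · exact List.rel_of_pairwise_cons hp hc2' x hxc hxc'
    · rcases List.mem_cons.1 hc' with rfl | hc2'
      · exact List.rel_of_pairwise_cons hp hc2 x hxc' hxc
      · exact ih hp.of_cons c hc2 c' hc2' hne x hxc hxc'

-- appending g after its shape was already emitted: remaining unrelated components survive
theorem scan_ext_phaseB (fs : List (List Int)) (g : List Int) (B0 : List Int)
    (hgne : g ≠ []) (hgB : ∀ x ∈ g, x ∈ B0) :
    ∀ {rest : List (List Int)} {used : Int → Prop} {cs : List (List Int)},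
      Scan fs rest used cs →
      (∀ c' ∈ cs, ((∃ y ∈ c', y ∈ g) → ∀ x ∈ c', x ∈ B0)
                ∧ ((∀ y ∈ c', y ∉ g) → ∀ x ∈ c', x ∉ B0)) →
      ∀ (usedE : Int → Prop), (∀ x, usedE x ↔ used x ∨ x ∈ B0) →
      Scan (fs ++ [g]) (rest ++ [g]) usedE
        (cs.filter (fun c' => PySem.Set.isdisjoint c' g)) := by
  intro rest used cs hs
  induction hs with
  | @nil used0 =>
    intro hB usedE hUE
    rw [List.nil_append]
    refine Scan.skip ?_ Scan.nil
    rcases List.exists_mem_of_ne_nil g hgne with ⟨u, hu⟩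
    exact ⟨u, hu, (hUE u).2 (Or.inr (hgB u hu))⟩
  | @skip h rest1 used1 cs1 htouch hrest ih =>
    intro hB usedE hUE
    refine Scan.skip ?_ (ih hB usedE hUE)
    rcases htouch with ⟨x, hx, hxu⟩
    exact ⟨x, hx, (hUE x).2 (Or.inl hxu)⟩
  | @lead h rest1 used1 c cs1 hhf hnu hchar hrest ih =>
    intro hB usedE hUE
    by_cases htc : ∃ y ∈ c, y ∈ g
    · have hcB : ∀ x ∈ c, x ∈ B0 := (hB c (by simp)).1 htc
      have hfil : (c :: cs1).filter (fun c' => PySem.Set.isdisjoint c' g)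
          = cs1.filter (fun c' => PySem.Set.isdisjoint c' g) := by
        apply List.filter_cons_of_neg
        rcases htc with ⟨y, hyc, hyg⟩
        simp [(isdisjoint_false_iff c g).2 ⟨y, hyg, hyc⟩]
      rw [hfil]
      have hhne : h ≠ [] := by
        intro hn
        rcases htc with ⟨y, hyc, _⟩
        rw [hn] at hchar
        exact reach_nil ((hchar y).1 hyc)
      rcases List.exists_mem_of_ne_nil h hhne with ⟨u, hu⟩
      refine Scan.skip ⟨u, hu, (hUE u).2 (Or.inr (hcB u ((hchar u).2 (.base hu))))⟩ ?_
      refine ih (fun c' hc' => hB c' (List.mem_cons_of_mem _ hc')) usedE ?_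
      intro x
      rw [hUE x]
      constructor
      · rintro (hxu | hxB)
        · exact Or.inl (Or.inl hxu)
        · exact Or.inr hxB
      · rintro ((hxu | hxc) | hxB)
        · exact Or.inl hxu
        · exact Or.inr (hcB x hxc)
        · exact Or.inr hxB
    · have hnt : ∀ y ∈ c, y ∉ g := by
        intro y hy hyg
        exact htc ⟨y, hy, hyg⟩
      have hcnB : ∀ x ∈ c, x ∉ B0 := (hB c (by simp)).2 hnt
      have hfil : (c :: cs1).filter (fun c' => PySem.Set.isdisjoint c' g)
          = c :: cs1.filter (fun c' => PySem.Set.isdisjoint c' g) := by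
        apply List.filter_cons_of_pos
        simp [isdisjoint_true_of_not_touch
          (fun ⟨x, hxg, hxc⟩ => hnt x hxc hxg : ¬ VTouch g c)]
      rw [hfil]
      refine Scan.lead (List.mem_append_left _ hhf) ?_ (ext_char_of_disjoint hchar hnt) ?_
      · intro x hx hux
        rcases (hUE x).1 hux with hxu | hxB
        · exact hnu x hx hxu
        · exact hcnB x ((hchar x).2 (.base hx)) hxB
      · refine ih (fun c' hc' => hB c' (List.mem_cons_of_mem _ hc'))
          (fun x => usedE x ∨ x ∈ c) ?_
        intro x
        constructor
        · rintro (hxe | hxc)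
          · rcases (hUE x).1 hxe with hxu | hxB
            · exact Or.inl (Or.inl hxu)
            · exact Or.inr hxB
          · exact Or.inl (Or.inr hxc)
        · rintro ((hxu | hxc) | hxB)
          · exact Or.inl ((hUE x).2 (Or.inl hxu))
          · exact Or.inr hxc
          · exact Or.inl ((hUE x).2 (Or.inr hxB))


-- appending one face g to the scanned list merges exactly the components g meets
theorem scan_ext (fs : List (List Int)) (g : List Int) :
    ∀ {rest : List (List Int)} {used : Int → Prop} {cs : List (List Int)},
      Scan fs rest used cs →
      (∀ h ∈ rest, h ∈ fs) →
      (∀ h ∈ fs, (∃ x ∈ h, used x) → ∀ x ∈ h, used x) →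
      (∀ h ∈ fs, h ∈ rest ∨ ∀ x ∈ h, used x) →
      (∀ x, used x → ¬ Reach (fs ++ [g]) g x) →
      Scan (fs ++ [g]) (rest ++ [g]) used (mergeR cs (PySem.Set.ofList g)) := by
  intro rest used cs hs
  induction hs with
  | @nil used0 =>
    intro hsuf hclosed hcov hW
    rw [List.nil_append, mergeR_nil]
    have hchar : ∀ x, x ∈ PySem.Set.ofList g ↔ Reach (fs ++ [g]) g x := by
      intro x
      constructor
      · exact fun hx => .base ((PySem.Set.mem_ofList _ _).1 hx)
      · intro hr
        refine reach_elim (fun z => z ∈ PySem.Set.ofList g)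
          (fun y hy => (PySem.Set.mem_ofList _ _).2 hy) ?_ hr
        intro t ht hex z hz
        rcases List.mem_append.1 ht with htf | htg
        · rcases hex with ⟨y, hyt, hyg⟩
          have hyu : used0 y := by
            rcases hcov t htf with htr | hused
            · cases htr
            · exact hused y hyt
          exact absurd (.base ((PySem.Set.mem_ofList _ _).1 hyg) : Reach (fs ++ [g]) g y)
            (hW y hyu)
        · rw [List.mem_singleton.1 htg] at hz
          exact (PySem.Set.mem_ofList _ _).2 hz
    refine Scan.lead (by simp) ?_ hchar Scan.nil
    intro x hx hxu
    exact hW x hxu (.base hx)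
  | @skip h rest1 used1 cs1 htouch hrest ih =>
    intro hsuf hclosed hcov hW
    refine Scan.skip htouch ?_
    have hhfs : h ∈ fs := hsuf h (by simp)
    have hhu : ∀ x ∈ h, used1 x := hclosed h hhfs htouch
    refine ih (fun t ht => hsuf t (List.mem_cons_of_mem _ ht)) hclosed ?_ hW
    intro t htf
    rcases hcov t htf with htr | hused
    · rcases List.mem_cons.1 htr with rfl | htr1
      · exact Or.inr hhu
      · exact Or.inl htr1
    · exact Or.inr hused
  | @lead h rest1 used1 c cs1 hhf hnu hchar hrest ih =>
    intro hsuf hclosed hcov hW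
    have hnode : Scan fs (h :: rest1) used1 (c :: cs1) := Scan.lead hhf hnu hchar hrest
    have hclosed' := scan_closed_extend hclosed hchar
    have hgF' : g ∈ fs ++ [g] := List.mem_append_right _ (by simp)
    have hhF' : h ∈ fs ++ [g] := List.mem_append_left _ hhf
    by_cases htc : ∃ y ∈ c, y ∈ g
    · -- g links this component: emit the merged blob here
      rcases htc with ⟨v, hvc, hvg⟩
      have hgne : g ≠ [] := fun hn => by rw [hn] at hvg; cases hvg
      have hdf : PySem.Set.isdisjoint c (PySem.Set.ofList g) = false :=
        (isdisjoint_false_iff _ _).2 ⟨v, (PySem.Set.mem_ofList _ _).2 hvg, hvc⟩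
      rw [mergeR_cons, if_neg (by simp [hdf])]
      have hcs1 := scan_comps hrest hclosed'
      have hpair1 := scan_pairwise hrest hclosed'
      have hpairN := scan_pairwise hnode hclosed
      set vs0 := PySem.Set.union (PySem.Set.ofList g) c with hvs0
      have hsubg : ∀ x ∈ g, x ∈ vs0 :=
        fun x hx => (PySem.Set.mem_union _ _ _).2 (Or.inl ((PySem.Set.mem_ofList _ _).2 hx))
      have hvsf : ∀ c' ∈ cs1, ∀ x ∈ c', x ∈ vs0 → x ∈ g := by
        intro c' hc' x hxc' hxu
        rcases (PySem.Set.mem_union _ _ _).1 hxu with hxg | hxc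
        · exact (PySem.Set.mem_ofList _ _).1 hxg
        · exact absurd (Or.inr hxc) ((hcs1 c' hc').1 x hxc')
      have hspec := absorbR_spec g cs1 vs0 hsubg hvsf hpair1
      set r1 := (absorbR cs1 vs0).1 with hr1def
      have hr1 : ∀ x, x ∈ r1 ↔
          (x ∈ g ∨ x ∈ c) ∨ ∃ c' ∈ cs1, (∃ y ∈ c', y ∈ g) ∧ x ∈ c' := by
        intro x
        rw [hr1def, hspec.1 x]
        constructor
        · rintro (hxv | hrest2)
          · rcases (PySem.Set.mem_union _ _ _).1 hxv with hxg | hxc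
            · exact Or.inl (Or.inl ((PySem.Set.mem_ofList _ _).1 hxg))
            · exact Or.inl (Or.inr hxc)
          · exact Or.inr hrest2
        · rintro ((hxg | hxc) | hrest2)
          · exact Or.inl ((PySem.Set.mem_union _ _ _).2
              (Or.inl ((PySem.Set.mem_ofList _ _).2 hxg)))
          · exact Or.inl ((PySem.Set.mem_union _ _ _).2 (Or.inr hxc))
          · exact Or.inr hrest2
      have hcnu : ∀ x ∈ c, ¬ used1 x := (scan_comps hnode hclosed c (by simp)).1
      -- nothing in the blob is already used
      have hr1nu : ∀ x ∈ r1, ¬ used1 x := by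
        intro x hx hxu
        rcases (hr1 x).1 hx with (hxg | hxc) | ⟨c', hc', _, hxc'⟩
        · exact hW x hxu (.base hxg)
        · exact hcnu x hxc hxu
        · exact (hcs1 c' hc').1 x hxc' (Or.inl hxu)
      -- any later component with no vertex of g is disjoint from the blob
      have hBdisj : ∀ cc ∈ cs1, (∀ y ∈ cc, y ∉ g) → ∀ x ∈ cc, x ∉ r1 := by
        intro cc hcc hnt x hx hxr
        rcases (hr1 x).1 hxr with (hxg | hxc) | ⟨c', hc', ⟨y', hy'c', hy'g⟩, hxc'⟩
        · exact hnt x hx hxg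
        · exact List.rel_of_pairwise_cons hpairN hcc x hxc hx
        · by_cases heq : cc = c'
          · rw [heq] at hnt
            exact hnt y' hy'c' hy'g
          · exact pairwise_disj_both hpair1 c' hc' cc hcc
              (fun he => heq he.symm) x hxc' hx
      -- the reachable set of g equals that of h in the extended face list
      have hgsub : ∀ z, Reach (fs ++ [g]) g z → Reach (fs ++ [g]) h z := by
        have hv1 : Reach (fs ++ [g]) g v := .base hvg
        have hv2 : Reach (fs ++ [g]) h v :=
          reach_mono (fun t ht => List.mem_append_left _ ht) ((hchar v).1 hvc)
        exact comp_glue hgF' hhF' hv1 hv2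
      have hcover := scan_cover hnode hsuf hclosed
      -- blob characterization
      have hcharB : ∀ x, x ∈ r1 ↔ Reach (fs ++ [g]) h x := by
        intro x
        constructor
        · intro hx
          rcases (hr1 x).1 hx with (hxg | hxc) | ⟨c', hc', ⟨y', hy'c', hy'g⟩, hxc'⟩
          · exact hgsub x (.base hxg)
          · exact reach_mono (fun t ht => List.mem_append_left _ ht) ((hchar x).1 hxc)
          · rcases (hcs1 c' hc').2 with ⟨h', hh'fs, hchar''⟩
            have hy'1 : Reach (fs ++ [g]) h' y' :=
              reach_mono (fun t ht => List.mem_append_left _ ht) ((hchar'' y').1 hy'c')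
            have hy'2 : Reach (fs ++ [g]) h y' := hgsub y' (.base hy'g)
            exact comp_glue (List.mem_append_left _ hh'fs) hhF' hy'1 hy'2 x
              (reach_mono (fun t ht => List.mem_append_left _ ht) ((hchar'' x).1 hxc'))
        · intro hr
          refine reach_elim (fun z => z ∈ r1)
            (fun y hy => (hr1 y).2 (Or.inl (Or.inr ((hchar y).2 (.base hy))))) ?_ hr
          intro t ht hex z hz
          rcases List.mem_append.1 ht with htf | htg
          · rcases hex with ⟨y, hyt, hyr⟩
            have htcase : (∀ x ∈ t, used1 x) ∨ ∃ cc ∈ c :: cs1, ∀ x ∈ t, x ∈ cc := by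
              rcases hcov t htf with htr | hused
              · exact hcover t htr
              · exact Or.inl hused
            rcases htcase with hused | ⟨cc, hcc, hsub⟩
            · exact absurd (hused y hyt) (hr1nu y hyr)
            · rcases List.mem_cons.1 hcc with rfl | hcc1
              · exact (hr1 z).2 (Or.inl (Or.inr (hsub z hz)))
              · by_cases htc2 : ∃ y2 ∈ cc, y2 ∈ g
                · exact (hr1 z).2 (Or.inr ⟨cc, hcc1, htc2, hsub z hz⟩)
                · have hnt2 : ∀ y2 ∈ cc, y2 ∉ g := fun y2 hy2 hy2g => htc2 ⟨y2, hy2, hy2g⟩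
                  exact absurd hyr (hBdisj cc hcc1 hnt2 y (hsub y hyt))
          · rw [List.mem_singleton.1 htg] at hz
            exact (hr1 z).2 (Or.inl (Or.inl hz))
      refine Scan.lead hhF' hnu hcharB ?_
      have hgB : ∀ x ∈ g, x ∈ r1 := fun x hx => (hr1 x).2 (Or.inl (Or.inl hx))
      have hB : ∀ c' ∈ cs1, ((∃ y ∈ c', y ∈ g) → ∀ x ∈ c', x ∈ r1)
          ∧ ((∀ y ∈ c', y ∉ g) → ∀ x ∈ c', x ∉ r1) := by
        intro c' hc'
        refine ⟨fun hty x hx => (hr1 x).2 (Or.inr ⟨c', hc', hty, hx⟩), hBdisj c' hc'⟩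
      have happ := scan_ext_phaseB fs g r1 hgne hgB hrest hB
        (fun x => used1 x ∨ x ∈ r1) ?_
      · have hr2 : (absorbR cs1 vs0).2
            = cs1.filter (fun c' => PySem.Set.isdisjoint c' g) := hspec.2
        rw [hr2] at *
        exact happ
      · intro x
        constructor
        · rintro (hxu | hxr)
          · exact Or.inl (Or.inl hxu)
          · exact Or.inr hxr
        · rintro ((hxu | hxc) | hxr)
          · exact Or.inl hxu
          · exact Or.inr ((hr1 x).2 (Or.inl (Or.inr hxc)))
          · exact Or.inr hxr
    · -- g misses this component: it survives unchanged
      have hnt : ∀ y ∈ c, y ∉ g := fun y hy hyg => htc ⟨y, hy, hyg⟩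
      have hdt : PySem.Set.isdisjoint c (PySem.Set.ofList g) = true := by
        apply isdisjoint_true_of_not_touch
        rintro ⟨x, hxg, hxc⟩
        exact hnt x hxc ((PySem.Set.mem_ofList _ _).1 hxg)
      rw [mergeR_cons, if_pos hdt]
      have hchar' := ext_char_of_disjoint hchar hnt
      refine Scan.lead hhF' hnu hchar' ?_
      refine ih (fun t ht => hsuf t (List.mem_cons_of_mem _ ht)) hclosed' ?_ ?_
      · intro t htf
        rcases hcov t htf with htr | hused
        · rcases List.mem_cons.1 htr with rfl | htr1
          · exact Or.inr (fun x hx => Or.inr ((hchar x).2 (.base hx)))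
          · exact Or.inl htr1
        · exact Or.inr (fun x hx => Or.inl (hused x hx))
      · rintro x (hxu | hxc) hrx
        · exact hW x hxu hrx
        · have hglue := comp_glue hgF' hhF' hrx
            (reach_mono (fun t ht => List.mem_append_left _ ht) ((hchar x).1 hxc))
          rcases List.exists_mem_of_ne_nil g (fun hn => by rw [hn] at hrx; exact reach_nil hrx)
            with ⟨u, hu⟩
          exact hnt u ((hchar' u).2 (hglue u (.base hu))) hu


-- B's fold performs the scan on the whole face list
theorem B_char (fs : List (List Int)) :
    Scan fs fs (fun _ => False) (fs.foldl bStep []) := by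
  induction fs using List.reverseRecOn with
  | nil => exact Scan.nil
  | append_singleton fs g ih =>
    rw [List.foldl_append, List.foldl_cons, List.foldl_nil, bStep_eq_mergeR]
    refine scan_ext fs g ih (fun t ht => ht) ?_ ?_ ?_
    · rintro t _ ⟨x, _, hx⟩
      cases hx
    · exact fun t ht => Or.inl ht
    · rintro x hx
      cases hx

theorem shapes_eq_alt (f : List (List Int)) (v : List Int) : shapes f v = shapes_alt f v := by
  have hmain := A_outer f (B_char f) 0 (by simp) [] PySem.Set.empty
    (by intro x; constructor
        · intro hx; cases hx
        · intro hx; cases hx)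
    (by rintro g _ ⟨x, _, hx⟩; cases hx)
    (by intro g hg; cases hg)
  unfold shapes shapes_alt
  rw [show ((0 : Nat) : Int) = (0 : Int) from rfl] at hmain
  rw [hmain]
  rw [List.nil_append]
-- ===== VERDICT (by name: the statement is the Claim_ definition above) =====
theorem shapes_spec : Claim_equal_shapes := by
  intro f v _
  show shapes f v = shapes_alt f v
  exact shapes_eq_alt f v
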